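-- pv_equiv track=rewrite | github.com/Portfolio-Solver-Platform/ai-tools | find-best-portfolio-experiment/on-minizinc-website-data/portfolio_interp.py | enumerate_portfolios
-- ===== SOURCE A (Python) =====
-- def enumerate_portfolios(systems, remaining=8, index=0):
--     bases = list(systems.keys())
--     if index == len(bases):
--         yield []
--         return
--     base = bases[index]
--     info = systems[base]
--     yield from enumerate_portfolios(systems, remaining, index + 1)
--     for c in sorted(info["supported_cores"]):
--         if c <= remaining:
--             for rest in enumerate_portfolios(systems, remaining - c, index + 1):
--                 yield [(base, c)] + rest
-- ===== SOURCE B (Python) =====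
-- def enumerate_portfolios(systems, remaining=8, index=0):
--     # Iterative breadth-first expansion of a (budget, picks) state list instead of DFS recursion.
--     bases = list(systems.keys())
--     states = [(remaining, [])]
--     for j in range(index, len(bases)):
--         b = bases[j]
--         cores = sorted(systems[b]["supported_cores"])
--         states = [(r, picks) if c is None else (r - c, picks + [(b, c)])
--                   for (r, picks) in states
--                   for c in [None] + cores
--                   if c is None or c <= r]
--     for _, picks in states:
--         yield picks
-- ===== Notes on version B (the rewrite author's own statement) =====
-- stated objective: alternative
-- what changed: Replaces A's pruned DFS generator recursion with a flat iterative breadth-first expansion: a list of (budget, picks) states is grown base by base (range(index, len(bases)) with bases[j]) under the same <=-budget pruning, then the picks are yielded.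
import Mathlib
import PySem

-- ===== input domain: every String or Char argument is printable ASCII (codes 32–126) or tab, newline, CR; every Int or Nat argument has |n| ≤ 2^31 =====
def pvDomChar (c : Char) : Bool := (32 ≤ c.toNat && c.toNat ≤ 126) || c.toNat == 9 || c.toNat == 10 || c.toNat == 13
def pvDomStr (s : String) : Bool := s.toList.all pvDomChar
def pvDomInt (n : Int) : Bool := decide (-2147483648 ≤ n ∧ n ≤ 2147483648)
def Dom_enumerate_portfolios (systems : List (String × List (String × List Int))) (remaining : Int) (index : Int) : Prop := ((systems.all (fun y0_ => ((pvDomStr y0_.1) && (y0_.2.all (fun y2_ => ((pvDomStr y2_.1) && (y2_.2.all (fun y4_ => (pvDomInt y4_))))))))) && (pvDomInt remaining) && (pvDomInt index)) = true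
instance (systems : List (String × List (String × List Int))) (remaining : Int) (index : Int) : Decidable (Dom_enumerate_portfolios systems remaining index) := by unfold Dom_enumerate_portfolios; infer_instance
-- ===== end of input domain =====

-- B replaces A's pruned DFS generator recursion with a flat iterative breadth-first expansion of a
-- (budget, picks) state list (objective: alternative). Both Pythons are generators; the equivalence
-- proved here is about the list of yielded values.

-- ===== PORT A =====
-- A's recursion stops when index reaches len(bases); the Nat fuel only makes that same computation
-- total (wherever the Python returns, the fuel chosen below never runs out). 'none' lookups
-- (IndexError/KeyError) return []; those inputs are excluded by Pre_.
def epA (systems : List (String × List (String × List Int))) (remaining : Int) (index : Int) : Nat → List (List (String × Int))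
  | 0 => []
  | Nat.succ fuel =>
    let d := PySem.Dict.ofList systems
    let bases := d.keys
    if index = (bases.length : Int) then [[]]
    else
      match PySem.List.pyGet? bases index with
      | none => []        -- IndexError
      | some base =>
        match d.get? base with
        | none => []      -- KeyError (unreachable: base ∈ keys)
        | some info =>
          match (PySem.Dict.ofList info).get? "supported_cores" with
          | none => []    -- KeyError
          | some cores =>
            epA systems remaining (index + 1) fuel ++
            (PySem.List.sorted cores (fun x => x) false).foldl (fun acc c =>
              if c ≤ remaining then
                acc ++ (epA systems (remaining - c) (index + 1) fuel).map (fun rest => (base, c) :: rest)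
              else acc) []

def enumerate_portfolios (systems : List (String × List (String × List Int))) (remaining : Int) (index : Int) : List (List (String × Int)) :=
  epA systems remaining index ((((PySem.Dict.ofList systems).keys.length : Int) - index).toNat + 1)

-- ===== PORT B =====
-- B's bases[j] for a negative j (IndexError out of range) is pyGet?; the getD defaults are only
-- reached outside Pre_.
def enumerate_portfolios_alt (systems : List (String × List (String × List Int))) (remaining : Int) (index : Int) : List (List (String × Int)) :=
  let d := PySem.Dict.ofList systems
  let bases := d.keys
  let states := (PySem.List.pyRange index (bases.length : Int) 1).foldl (fun states j =>
      let b := (PySem.List.pyGet? bases j).getD ""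
      let cores := PySem.List.sorted ((PySem.Dict.ofList ((d.get? b).getD [])).getD "supported_cores" []) (fun x => x) false
      states.flatMap (fun st =>
        (none :: cores.map some).filterMap (fun c? =>
          match c? with
          | none => some st
          | some c => if c ≤ st.1 then some (st.1 - c, st.2 ++ [(b, c)]) else none)))
    [(remaining, [])]
  states.map (·.2)

-- ===== PRECONDITION & SPEC =====
-- Pre_ is exactly where the Python A returns: index in -len..len (outside, A's bases[index] raises
-- IndexError) and every system dict A touches — positions index.. for index ≥ 0, all of them for a
-- negative index (Python's wraparound makes A revisit every system) — has the "supported_cores" key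
-- (A raises KeyError otherwise).
def Pre_enumerate_portfolios (systems : List (String × List (String × List Int))) (remaining : Int) (index : Int) : Prop :=
  -(((PySem.Dict.ofList systems).keys.length : Int)) ≤ index ∧
  index ≤ ((PySem.Dict.ofList systems).keys.length : Int) ∧
  ∀ p ∈ (PySem.Dict.ofList systems).items.drop index.toNat,
    (PySem.Dict.ofList p.2).contains "supported_cores" = true
instance (systems : List (String × List (String × List Int))) (remaining : Int) (index : Int) : Decidable (Pre_enumerate_portfolios systems remaining index) := by unfold Pre_enumerate_portfolios; infer_instance

def pvWitness_enumerate_portfolios : (List (String × List (String × List Int))) × Int × Int :=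
  ([("mzn", [("supported_cores", [1, 2])]), ("cp", [("supported_cores", [4])])], 8, 0)

def Spec_enumerate_portfolios (systems : List (String × List (String × List Int))) (remaining : Int) (index : Int) (out : List (List (String × Int))) : Prop := out = enumerate_portfolios_alt systems remaining index
instance (systems : List (String × List (String × List Int))) (remaining : Int) (index : Int) (out : List (List (String × Int))) : Decidable (Spec_enumerate_portfolios systems remaining index out) := by unfold Spec_enumerate_portfolios; infer_instance

-- ===== CLAIM (what is proved, stated in full; the proofs are below) =====
def Claim_equal_enumerate_portfolios : Prop := ∀ (systems : List (String × List (String × List Int))) (remaining : Int) (index : Int), Dom_enumerate_portfolios systems remaining index → Pre_enumerate_portfolios systems remaining index → Spec_enumerate_portfolios systems remaining index (enumerate_portfolios systems remaining index)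
-- ===== LEMMAS AND PROOFS =====

-- the sorted core list of one system's info dict
def resCores (v : List (String × List Int)) : List Int :=
  PySem.List.sorted ((PySem.Dict.ofList v).getD "supported_cores" []) (fun x => x) false

-- the sequence of dict items A visits from position index on (wraparound for a negative index)
def procSeq (systems : List (String × List (String × List Int))) (i : Int) : List (String × List (String × List Int)) :=
  let items := (PySem.Dict.ofList systems).items
  if 0 ≤ i then items.drop i.toNat else items.drop (items.length + i).toNat ++ items

-- A's recursion, restated over that item sequence
def gA : List (String × List (String × List Int)) → Int → List (List (String × Int))
  | [], _ => [[]]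
  | (b, v) :: rest, r =>
    gA rest r ++ (resCores v).foldl (fun acc c =>
      if c ≤ r then acc ++ (gA rest (r - c)).map (fun t => (b, c) :: t) else acc) []

-- B's per-base state expansion, over one resolved item of the dict
def stepB (p : String × List (String × List Int)) (states : List (Int × List (String × Int))) : List (Int × List (String × Int)) :=
  states.flatMap (fun st =>
    (none :: (resCores p.2).map some).filterMap (fun c? =>
      match c? with
      | none => some st
      | some c => if c ≤ st.1 then some (st.1 - c, st.2 ++ [(p.1, c)]) else none))

theorem pyGet?_map_fst (l : List (String × List (String × List Int))) (i : Int) :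
    PySem.List.pyGet? (l.map (·.1)) i = (PySem.List.pyGet? l i).map (·.1) := by
  simp [PySem.List.pyGet?, PySem.List.pyIdx?]

theorem procSeq_len (systems : List (String × List (String × List Int))) :
    procSeq systems ((PySem.Dict.ofList systems).items.length : Int) = [] := by
  rw [procSeq]
  simp

theorem procSeq_len' (systems : List (String × List (String × List Int))) :
    procSeq systems ((PySem.Dict.ofList systems).keys.length : Int) = [] := by
  have h : (PySem.Dict.ofList systems).keys.length = (PySem.Dict.ofList systems).items.length := by
    simp [PySem.Dict.keys]
  rw [h, procSeq_len]

theorem procSeq_cons (systems : List (String × List (String × List Int))) (i : Int)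
    (hge : -(((PySem.Dict.ofList systems).items.length : Int)) ≤ i)
    (hlt : i < ((PySem.Dict.ofList systems).items.length : Int)) :
    ∃ p, PySem.List.pyGet? (PySem.Dict.ofList systems).items i = some p ∧
      procSeq systems i = p :: procSeq systems (i + 1) := by
  set items := (PySem.Dict.ofList systems).items with hit
  by_cases h0 : 0 ≤ i
  · have hj : i.toNat < items.length := by omega
    refine ⟨items[i.toNat], ?_, ?_⟩
    · rw [PySem.List.pyGet?_of_nonneg _ h0]
      simp [hj]
    · rw [procSeq, procSeq, if_pos h0, if_pos (by omega : (0:Int) ≤ i + 1), ← hit]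
      rw [List.drop_eq_getElem_cons hj]
      congr 1
      congr 1
      omega
  · have hk1 : 0 < (-i).toNat := by omega
    have hk2 : (-i).toNat ≤ items.length := by omega
    have hieq : i = -(((-i).toNat : Int)) := by omega
    have hjlt : items.length - (-i).toNat < items.length := by omega
    refine ⟨items[items.length - (-i).toNat], ?_, ?_⟩
    · have h := PySem.List.pyGet?_neg_natCast items ((-i).toNat) hk1 hk2
      rw [show -((((-i).toNat) : Int)) = i by omega] at h
      rw [h]
      simp [hjlt]
    · have hdrop : items.drop (items.length + i).toNat =
          items[items.length - (-i).toNat] :: items.drop (items.length - (-i).toNat + 1) := by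
        have : (items.length + i).toNat = items.length - (-i).toNat := by omega
        rw [this]
        exact List.drop_eq_getElem_cons hjlt
      by_cases h1 : 0 ≤ i + 1
      · -- i = -1
        have hi1 : i = -1 := by omega
        rw [procSeq, procSeq, if_neg h0, if_pos h1, ← hit, hdrop]
        have h2 : items.length - (-i).toNat + 1 = items.length := by omega
        have h3 : (i + 1).toNat = 0 := by omega
        rw [h2, h3, List.drop_length, List.drop_zero]
        simp
      · rw [procSeq, procSeq, if_neg h0, if_neg h1, ← hit, hdrop]
        have h2 : (items.length + (i + 1)).toNat = items.length - (-i).toNat + 1 := by omega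
        rw [h2]
        rfl

theorem procSeq_subset (systems : List (String × List (String × List Int))) (i : Int)
    (p : String × List (String × List Int)) (hp : p ∈ procSeq systems i) :
    p ∈ (PySem.Dict.ofList systems).items := by
  rw [procSeq] at hp
  split at hp
  · exact List.mem_of_mem_drop hp
  · rcases List.mem_append.mp hp with h | h
    · exact List.mem_of_mem_drop h
    · exact h

-- A's inner core loop is a flatMap
theorem inner_foldl (cs : List Int) (r : Int) (b : String) (g : Int → List (List (String × Int))) :
    cs.foldl (fun acc c => if c ≤ r then acc ++ (g c).map (fun t => (b, c) :: t) else acc) [] =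
      cs.flatMap (fun c => if c ≤ r then (g c).map (fun t => (b, c) :: t) else []) := by
  have h : (fun (acc : List (List (String × Int))) (c : Int) => if c ≤ r then acc ++ (g c).map (fun t => (b, c) :: t) else acc) = fun acc c => acc ++ (if c ≤ r then (g c).map (fun t => (b, c) :: t) else []) := by
    funext acc c; split <;> simp
  rw [h, PySem.List.foldl_append_eq_flatMap, List.nil_append]

-- invariant of B's breadth-first loop: each surviving state extends one of the portfolios A enumerates
theorem gA_main (L : List (String × List (String × List Int))) (S : List (Int × List (String × Int))) :
    ((L.foldl (fun sts p => stepB p sts) S).map (·.2)) =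
      S.flatMap (fun st => (gA L st.1).map (fun t => st.2 ++ t)) := by
  induction L generalizing S with
  | nil => simp [gA, List.map_eq_flatMap]
  | cons p L ih =>
    obtain ⟨b, v⟩ := p
    rw [List.foldl_cons, ih]
    conv_lhs => rw [stepB]
    rw [List.flatMap_assoc]
    congr 1; funext st
    obtain ⟨r, picks⟩ := st
    simp only [gA, List.map_append, inner_foldl, List.filterMap_cons]
    simp only [List.filterMap_map, Function.comp_def, List.filterMap_eq_flatMap_toList,
      List.flatMap_assoc, List.map_flatMap]
    rw [List.flatMap_cons]
    congr 1
    rw [List.flatMap_assoc, List.flatMap_map]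
    congr 1; funext c
    by_cases hc : c ≤ r <;> simp [hc]

-- A's fueled port computes gA on the visited item sequence
theorem epA_eq_gA (systems : List (String × List (String × List Int))) (fuel : Nat) (r i : Int)
    (hge : -(((PySem.Dict.ofList systems).keys.length : Int)) ≤ i)
    (hle : i ≤ ((PySem.Dict.ofList systems).keys.length : Int))
    (hfuel : (((PySem.Dict.ofList systems).keys.length : Int) - i).toNat < fuel)
    (hk : ∀ p ∈ procSeq systems i, (PySem.Dict.ofList p.2).contains "supported_cores" = true) :
    epA systems r i fuel = gA (procSeq systems i) r := by
  induction fuel generalizing r i with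
  | zero => omega
  | succ fuel ih =>
    have hkeys : (PySem.Dict.ofList systems).keys = (PySem.Dict.ofList systems).items.map (·.1) := rfl
    have hlen : (PySem.Dict.ofList systems).keys.length = (PySem.Dict.ofList systems).items.length := by
      simp [PySem.Dict.keys]
    by_cases hi : i = ((PySem.Dict.ofList systems).keys.length : Int)
    · rw [hi, procSeq_len']
      simp [epA, gA]
    · obtain ⟨p, hp1, hp2⟩ := procSeq_cons systems i (by omega) (by omega)
      have hget : PySem.List.pyGet? (PySem.Dict.ofList systems).keys i = some p.1 := by
        rw [hkeys, pyGet?_map_fst, hp1]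
        rfl
      have hmem : p ∈ (PySem.Dict.ofList systems).items := PySem.List.mem_of_pyGet?_eq_some _ hp1
      have hbase : (PySem.Dict.ofList systems).get? p.1 = some p.2 := by
        exact PySem.Dict.get?_of_mem_items _ (by rw [← Prod.mk.eta (p := p)] at hmem; exact hmem)
          (PySem.Dict.nodup_keys_ofList systems)
      have hhead : (PySem.Dict.ofList p.2).contains "supported_cores" = true := by
        apply hk; rw [hp2]; exact List.mem_cons_self
      have hsome : (PySem.Dict.ofList p.2).get? "supported_cores" =
          some ((PySem.Dict.ofList p.2).getD "supported_cores" []) := by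
        rw [PySem.Dict.contains_eq_isSome_get?] at hhead
        obtain ⟨x, hx⟩ := Option.isSome_iff_exists.mp hhead
        rw [hx, PySem.Dict.getD_of_get?_eq_some _ _ hx]
      have hrec : ∀ r', epA systems r' (i + 1) fuel = gA (procSeq systems (i + 1)) r' := by
        intro r'
        refine ih r' (i + 1) (by omega) (by omega) (by omega) ?_
        intro q hq
        apply hk
        rw [hp2]
        exact List.mem_cons_of_mem _ hq
      rw [hp2]
      conv_lhs => rw [epA]
      simp only [if_neg hi, hget, hbase, hsome, hrec]
      rw [← Prod.mk.eta (p := p), gA]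
      rfl

-- the index range B iterates resolves to the same visited item sequence
theorem range_map (systems : List (String × List (String × List Int))) (n : Nat) : ∀ (i : Int),
    (((PySem.Dict.ofList systems).items.length : Int) - i).toNat = n →
    -(((PySem.Dict.ofList systems).items.length : Int)) ≤ i →
    i ≤ ((PySem.Dict.ofList systems).items.length : Int) →
    (PySem.List.pyRange i ((PySem.Dict.ofList systems).items.length : Int) 1).map
        (fun j => (PySem.List.pyGet? (PySem.Dict.ofList systems).items j).getD ("", [])) =
      procSeq systems i := by
  induction n with
  | zero =>
    intro i hn hge hle
    have hi : i = ((PySem.Dict.ofList systems).items.length : Int) := by omega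
    rw [hi, procSeq_len]
    simp [PySem.List.pyRange]
  | succ n ih =>
    intro i hn hge hle
    have hlt : i < ((PySem.Dict.ofList systems).items.length : Int) := by omega
    obtain ⟨p, hp1, hp2⟩ := procSeq_cons systems i (by omega) hlt
    rw [PySem.List.pyRange_one_cons hlt, List.map_cons, hp1, hp2]
    congr 1
    exact ih (i + 1) (by omega) (by omega) (by omega)

-- ===== VERDICT (by name: the statement is the Claim_ definition above) =====
theorem enumerate_portfolios_spec : Claim_equal_enumerate_portfolios := by
  intro systems remaining index _hdom hpre
  obtain ⟨hge, hle, hk⟩ := hpre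
  unfold Spec_enumerate_portfolios
  have hkeys : (PySem.Dict.ofList systems).keys = (PySem.Dict.ofList systems).items.map (·.1) := rfl
  have hlen : (PySem.Dict.ofList systems).keys.length = (PySem.Dict.ofList systems).items.length := by
    simp [PySem.Dict.keys]
  have hk' : ∀ p ∈ procSeq systems index,
      (PySem.Dict.ofList p.2).contains "supported_cores" = true := by
    intro p hp
    apply hk
    by_cases h0 : (0 : Int) ≤ index
    · rw [procSeq, if_pos h0] at hp
      exact hp
    · have h0' : index.toNat = 0 := by omega
      rw [h0', List.drop_zero]
      exact procSeq_subset systems index p hp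
  rw [enumerate_portfolios, epA_eq_gA systems _ remaining index hge hle (by omega) hk']
  rw [enumerate_portfolios_alt]
  rw [PySem.List.foldl_congr_mem _ _
    (fun sts j => stepB ((PySem.List.pyGet? (PySem.Dict.ofList systems).items j).getD ("", [])) sts) _ ?_]
  · rw [← List.foldl_map (f := fun j => (PySem.List.pyGet? (PySem.Dict.ofList systems).items j).getD ("", []))
      (g := fun sts p => stepB p sts)]
    rw [hlen, range_map systems ((((PySem.Dict.ofList systems).items.length : Int)) - index).toNat index rfl (by omega) (by omega)]
    rw [gA_main]
    simp
  · intro acc j hj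
    rw [PySem.List.mem_pyRange_one] at hj
    have hjget : ∃ p, PySem.List.pyGet? (PySem.Dict.ofList systems).items j = some p := by
      obtain ⟨p, hp1, _⟩ := procSeq_cons systems j (by omega) (by omega)
      exact ⟨p, hp1⟩
    obtain ⟨p, hp⟩ := hjget
    have hgetk : PySem.List.pyGet? (PySem.Dict.ofList systems).keys j = some p.1 := by
      rw [hkeys, pyGet?_map_fst, hp]; rfl
    have hmem : p ∈ (PySem.Dict.ofList systems).items := PySem.List.mem_of_pyGet?_eq_some _ hp
    have hbase : (PySem.Dict.ofList systems).get? p.1 = some p.2 :=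
      PySem.Dict.get?_of_mem_items _ (by rw [← Prod.mk.eta (p := p)] at hmem; exact hmem)
        (PySem.Dict.nodup_keys_ofList systems)
    simp only [hgetk, hp, Option.getD_some, hbase, stepB, resCores]
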